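-- pv_equiv track=rewrite | github.com/ShujiaHuang/AsmVar2 | asmvar/common.py | set_gap_open_penalty
-- ===== SOURCE A (Python) =====
-- def set_gap_open_penalty(seq, homopol_penalty):
--     """
--     Setting the gap open penalty by using the homopol_penalize model
--
--     Args:
--         ``length``: The haplotype sequence string.
--         ``homopol_penalty``: penalty model could be ``CommonDatum.homopol_penalize``
--                              and the ASCII value is from big to small.
--     """
--
--     gap_open_penalty = []
--     # Fill in the penalty from the back(NOT from head!) to help
--     # left-justify indels
--     homo_char = seq[-1].upper()
--     hi = -1 # number of homopolymer
--     for c in seq[::-1]: # Count from tail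
--
--         if c.upper() == homo_char:
--             if hi < len(homopol_penalty): # Not be overflow
--                 hi += 1
--         else:
--             hi = 0
--
--         penalty_value = ord(homopol_penalty[hi]) - 33
--         if penalty_value < 0 or hi < 0:
--             raise ValueError('Encountered negative gap open score: %s in %s '
--                              '\n' % (penalty_value, seq))
--         gap_open_penalty.append(chr(penalty_value)) # covert to be ASCII
--
--         homo_char = c.upper() # Move homo_char to the next
--
--     return ''.join(gap_open_penalty) # A char string
-- ===== SOURCE B (Python) =====
-- def set_gap_open_penalty(seq, homopol_penalty):
--     # Staged re-implementation: (1) forward run-length encode the case-folded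
--     # sequence, (2) translate the penalty model once, up to the longest run,
--     # (3) emit, per run in tail-to-head order, a prefix of that table.
--     up = seq.upper()
--     runs = []
--     i = 0
--     while i < len(up):
--         j = i
--         while j < len(up) and up[j] == up[i]:
--             j += 1
--         runs.append(j - i)
--         i = j
--     m = max(runs)
--     table = []
--     for k in range(m):
--         pv = ord(homopol_penalty[k]) - 33
--         if pv < 0:
--             raise ValueError('Encountered negative gap open score: %s in %s '
--                              '\n' % (pv, seq))
--         table.append(chr(pv))
--     t = ''.join(table)
--     return ''.join(t[:L] for L in reversed(runs))
-- ===== Notes on version B (the rewrite author's own statement) =====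
-- stated objective: alternative
-- what changed: Replaces A's single reverse scan with carried state (homo_char and the capped counter hi, one penalty lookup per character) by three independent stages: a forward run-length encoding of the case-folded sequence, a single translation of the penalty model into a table up to the longest run, and a join of table prefixes taken per run in reversed run order.
import Mathlib
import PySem

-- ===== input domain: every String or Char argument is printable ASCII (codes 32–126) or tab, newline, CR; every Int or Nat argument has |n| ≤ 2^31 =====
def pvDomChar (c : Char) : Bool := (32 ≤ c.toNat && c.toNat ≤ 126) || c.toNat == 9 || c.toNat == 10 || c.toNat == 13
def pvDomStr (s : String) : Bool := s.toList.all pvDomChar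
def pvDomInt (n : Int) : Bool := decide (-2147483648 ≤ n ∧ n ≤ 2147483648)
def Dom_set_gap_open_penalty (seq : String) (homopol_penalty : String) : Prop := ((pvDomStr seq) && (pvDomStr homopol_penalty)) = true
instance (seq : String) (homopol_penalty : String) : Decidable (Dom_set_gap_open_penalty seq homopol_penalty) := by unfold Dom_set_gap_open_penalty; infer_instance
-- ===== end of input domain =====

-- B replaces A's stateful reverse scan by three staged passes (forward
-- run-length encoding, one translation table, join of prefixes); same cost,
-- equal return value on Pre_.

-- ===== PORT A =====
-- A's loop over seq[::-1], carrying homo_char and the counter hi (Int, starts -1).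
-- 'none' is exactly where the Python raises (IndexError on homopol_penalty[hi],
-- or the explicit ValueError); Pre_ excludes those inputs.
-- c.upper() on a single char is PySem.Chars.upperChar (exact on the ASCII domain).
def pvGoA (hp : List Char) : List Char → Char → Int → Option (List Char)
  | [], _, _ => some []
  | c :: rest, homo, hi =>
    let hi' : Int :=
      if PySem.Chars.upperChar c = homo then
        (if hi < (hp.length : Int) then hi + 1 else hi)
      else 0
    match PySem.List.pyGet? hp hi' with
    | none => none                     -- IndexError
    | some p =>
      let pv : Int := (p.toNat : Int) - 33
      if pv < 0 ∨ hi' < 0 then none    -- ValueError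
      else
        match pvGoA hp rest (PySem.Chars.upperChar c) hi' with
        | none => none
        | some tl => some (Char.ofNat pv.toNat :: tl)

def set_gap_open_penalty (seq : String) (homopol_penalty : String) : String :=
  match seq.toList.reverse with
  | [] => ""                           -- seq[-1] raises IndexError; outside Pre_
  | c0 :: _ =>
    match pvGoA homopol_penalty.toList seq.toList.reverse (PySem.Chars.upperChar c0) (-1) with
    | none => ""                       -- exception path; outside Pre_
    | some out => String.ofList out

-- ===== PORT B =====
-- the forward while-loop run-length encoding of Source B over the case-folded list
-- (the inner 'while up[j] == up[i]' scan is the takeWhile, the advance of i the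
-- dropWhile; same characters compared in the same order)
def pvRunLengths : List Char → List Nat
  | [] => []
  | c :: rest =>
    (1 + (rest.takeWhile (fun d => d = c)).length) ::
      pvRunLengths (rest.dropWhile (fun d => d = c))
termination_by l => l.length
decreasing_by
  have := List.length_dropWhile_le (fun d => decide (d = c)) rest
  simp only [List.length_cons]
  omega

-- the 'for k in range(m)' table-building loop; 'none' where the Python raises
def pvTblAux (hp : List Char) : Nat → Nat → Option (List Char)
  | _, 0 => some []
  | k, n + 1 =>
    match PySem.List.pyGet? hp (k : Int) with
    | none => none                     -- IndexError
    | some p =>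
      let pv : Int := (p.toNat : Int) - 33
      if pv < 0 then none              -- ValueError
      else
        match pvTblAux hp (k + 1) n with
        | none => none
        | some tl => some (Char.ofNat pv.toNat :: tl)

def set_gap_open_penalty_alt (seq : String) (homopol_penalty : String) : String :=
  let up := seq.toList.map PySem.Chars.upperChar
  let runs := pvRunLengths up
  match runs.max? with
  | none => ""                         -- max([]) raises ValueError; outside Pre_
  | some m =>
    match pvTblAux homopol_penalty.toList 0 m with
    | none => ""                       -- exception path; outside Pre_
    | some table =>
      String.ofList ((runs.reverse.map (fun L => table.take L)).flatten)

-- ===== PRECONDITION & SPEC =====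
-- Pre_ = exactly the inputs where Python A returns normally: seq nonempty
-- (seq[-1] raises IndexError on ''), and every window of consecutive characters
-- with equal upper-cased letter (i.e. every case-insensitive homopolymer run
-- and its sub-windows) is no longer than the penalty model (else IndexError)
-- with all model characters it touches of code >= 33 (else the ValueError).
def Pre_set_gap_open_penalty (seq : String) (homopol_penalty : String) : Prop :=
  seq ≠ "" ∧
  ∀ j ∈ List.range seq.toList.length, ∀ k ∈ List.range seq.toList.length, j ≤ k →
    (∀ t ∈ List.range (k + 1), j ≤ t →
      PySem.Chars.upperChar (seq.toList.getD t ' ') = PySem.Chars.upperChar (seq.toList.getD j ' ')) →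
    (k - j + 1 ≤ homopol_penalty.toList.length ∧
     ∀ i ∈ List.range (k - j + 1), 33 ≤ (homopol_penalty.toList.getD i ' ').toNat)
instance (seq : String) (homopol_penalty : String) : Decidable (Pre_set_gap_open_penalty seq homopol_penalty) := by unfold Pre_set_gap_open_penalty; infer_instance

def pvWitness_set_gap_open_penalty : String × String := ("AAb", "FED")

def Spec_set_gap_open_penalty (seq : String) (homopol_penalty : String) (out : String) : Prop := out = set_gap_open_penalty_alt seq homopol_penalty
instance (seq : String) (homopol_penalty : String) (out : String) : Decidable (Spec_set_gap_open_penalty seq homopol_penalty out) := by unfold Spec_set_gap_open_penalty; infer_instance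

-- ===== CLAIM (what is proved, stated in full; the proofs are below) =====
def Claim_equal_set_gap_open_penalty : Prop := ∀ (seq : String) (homopol_penalty : String), Dom_set_gap_open_penalty seq homopol_penalty → Pre_set_gap_open_penalty seq homopol_penalty → Spec_set_gap_open_penalty seq homopol_penalty (set_gap_open_penalty seq homopol_penalty)

-- ===== LEMMAS AND PROOFS =====

-- proof-only intermediates: A's scan is first related to a grouping of the
-- reversed sequence into maximal case-insensitive runs, which is then related
-- to B's forward run-length encoding.
def pvGroupByUpperAux : Nat → List Char → List (List Char)
  | _, [] => []
  | 0, _ :: _ => []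
  | n + 1, c :: rest =>
    (c :: rest.takeWhile (fun d => PySem.Chars.upperChar d = PySem.Chars.upperChar c)) ::
      pvGroupByUpperAux n (rest.dropWhile (fun d => PySem.Chars.upperChar d = PySem.Chars.upperChar c))

def pvGroupByUpper (l : List Char) : List (List Char) := pvGroupByUpperAux l.length l

def pvGoRun (hp : List Char) : List Char → Nat → Option (List Char)
  | [], _ => some []
  | _ :: rest, hi =>
    match PySem.List.pyGet? hp (hi : Int) with
    | none => none
    | some p =>
      let pv : Int := (p.toNat : Int) - 33
      if pv < 0 then none
      else
        match pvGoRun hp rest (hi + 1) with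
        | none => none
        | some tl => some (Char.ofNat pv.toNat :: tl)

def pvGoB (hp : List Char) : List (List Char) → Option (List Char)
  | [] => some []
  | r :: rs =>
    match pvGoRun hp r 0 with
    | none => none
    | some out =>
      match pvGoB hp rs with
      | none => none
      | some tl => some (out ++ tl)

def pvJoin (hp : List Char) : List Nat → Option (List Char)
  | [] => some []
  | L :: Ls =>
    match pvTblAux hp 0 L with
    | none => none
    | some t =>
      match pvJoin hp Ls with
      | none => none
      | some tl => some (t ++ tl)

theorem pvGet_lt {hp : List Char} {i : Nat} {p : Char}
    (h : PySem.List.pyGet? hp (i : Int) = some p) : i < hp.length := by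
  rw [PySem.List.pyGet?_natCast] at h
  exact (List.getElem?_eq_some_iff.mp h).1

theorem pvGroupByUpperAux_eq : ∀ (n m : Nat) (l : List Char), l.length ≤ n → l.length ≤ m →
    pvGroupByUpperAux n l = pvGroupByUpperAux m l := by
  intro n
  induction n with
  | zero =>
    intro m l hn _
    have : l = [] := List.length_eq_zero_iff.mp (Nat.le_zero.mp hn)
    subst this
    cases m <;> rfl
  | succ n' ih =>
    intro m l hn hm
    cases l with
    | nil => cases m <;> rfl
    | cons c rest =>
      cases m with
      | zero => exact absurd hm (by simp)
      | succ m' =>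
        simp only [pvGroupByUpperAux]
        congr 1
        apply ih
        · have := List.length_dropWhile_le (fun d => decide (PySem.Chars.upperChar d = PySem.Chars.upperChar c)) rest
          simp only [List.length_cons] at hn
          omega
        · have := List.length_dropWhile_le (fun d => decide (PySem.Chars.upperChar d = PySem.Chars.upperChar c)) rest
          simp only [List.length_cons] at hm
          omega

theorem pvGroupByUpper_cons (c : Char) (rest : List Char) :
    pvGroupByUpper (c :: rest) =
      (c :: rest.takeWhile (fun d => PySem.Chars.upperChar d = PySem.Chars.upperChar c)) ::
        pvGroupByUpper (rest.dropWhile (fun d => PySem.Chars.upperChar d = PySem.Chars.upperChar c)) := by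
  unfold pvGroupByUpper
  simp only [List.length_cons, pvGroupByUpperAux]
  congr 1
  apply pvGroupByUpperAux_eq
  · exact List.length_dropWhile_le _ _
  · exact le_rfl

theorem pvGoA_run (hp : List Char) (l : List Char) (rest : List Char) (k : Char) (hi : Nat)
    (hlt : hi < hp.length) (hk : ∀ c ∈ l, PySem.Chars.upperChar c = k) :
    pvGoA hp (l ++ rest) k (hi : Int) =
      match pvGoRun hp l (hi + 1) with
      | none => none
      | some out =>
        match pvGoA hp rest k ((hi + l.length : Nat) : Int) with
        | none => none
        | some tl => some (out ++ tl) := by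
  induction l generalizing hi with
  | nil =>
    simp [pvGoRun]
    cases pvGoA hp rest k (hi : Int) <;> simp
  | cons d l' ih =>
    have hd := hk d (by simp)
    simp only [List.cons_append, pvGoA, hd, if_pos, pvGoRun]
    have hc : ((hi : Int) < (hp.length : Int)) := by exact_mod_cast hlt
    have hcast : ((hi : Int) + 1) = ((hi + 1 : Nat) : Int) := by push_cast; ring
    rw [if_pos hc, hcast]
    cases hg : PySem.List.pyGet? hp ((hi + 1 : Nat) : Int) with
    | none => simp
    | some p =>
      have hlt' : hi + 1 < hp.length := pvGet_lt hg
      simp only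
      by_cases hpv : ((p.toNat : Int) - 33 < 0)
      · rw [if_pos (Or.inl hpv), if_pos hpv]
      · rw [if_neg (by omega), if_neg hpv]
        rw [ih (hi + 1) hlt' (fun c hc => hk c (List.mem_cons_of_mem _ hc))]
        have h1 : hi + 1 + l'.length = hi + (l'.length + 1) := by omega
        have h2 : hi + (d :: l').length = hi + (l'.length + 1) := by simp
        rw [h1, h2]
        cases pvGoRun hp l' (hi + 1 + 1) with
        | none => simp
        | some out =>
          simp only
          cases pvGoA hp rest k ((hi + (l'.length + 1) : Nat) : Int) <;> simp

def pvEntry (hp : List Char) (l : List Char) (k : Char) (hi : Int) : Prop :=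
  match l with
  | [] => True
  | c :: _ =>
    (if PySem.Chars.upperChar c = k then
      (if hi < (hp.length : Int) then hi + 1 else hi)
     else 0) = 0

theorem pvGoA_eq_pvGoB (hp : List Char) :
    ∀ n (l : List Char), l.length ≤ n → ∀ (k : Char) (hi : Int),
    pvEntry hp l k hi → pvGoA hp l k hi = pvGoB hp (pvGroupByUpper l) := by
  intro n
  induction n with
  | zero =>
    intro l hl k hi _
    have : l = [] := List.length_eq_zero_iff.mp (Nat.le_zero.mp hl)
    subst this
    simp [pvGoA, pvGroupByUpper, pvGroupByUpperAux, pvGoB]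
  | succ m ih =>
    intro l hl k hi hent
    cases l with
    | nil => simp [pvGoA, pvGroupByUpper, pvGroupByUpperAux, pvGoB]
    | cons c rest =>
      have hent' : (if PySem.Chars.upperChar c = k then
          (if hi < (hp.length : Int) then hi + 1 else hi) else 0) = 0 := hent
      rw [pvGroupByUpper_cons]
      rw [pvGoA, hent']
      rw [pvGoB, pvGoRun]
      rw [show ((0 : Nat) : Int) = (0 : Int) from rfl]
      cases hg : PySem.List.pyGet? hp (0 : Int) with
      | none => simp
      | some p =>
        have hlen0 : 0 < hp.length := pvGet_lt (i := 0) (by exact_mod_cast hg)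
        simp only
        by_cases hpv : ((p.toNat : Int) - 33 < 0)
        · rw [if_pos (Or.inl hpv), if_pos hpv]
        · rw [if_neg (by omega), if_neg hpv]
          have hkeys : ∀ d ∈ List.takeWhile (fun d => decide (PySem.Chars.upperChar d = PySem.Chars.upperChar c)) rest, PySem.Chars.upperChar d = PySem.Chars.upperChar c := by
            intro d hd
            simpa using List.mem_takeWhile_imp hd
          have hbr := pvGoA_run hp
            (List.takeWhile (fun d => decide (PySem.Chars.upperChar d = PySem.Chars.upperChar c)) rest)
            (List.dropWhile (fun d => decide (PySem.Chars.upperChar d = PySem.Chars.upperChar c)) rest)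
            (PySem.Chars.upperChar c) 0 hlen0 hkeys
          rw [show ((0 : Nat) : Int) = (0 : Int) from rfl] at hbr
          conv_lhs => rw [show rest = List.takeWhile (fun d => decide (PySem.Chars.upperChar d = PySem.Chars.upperChar c)) rest ++ List.dropWhile (fun d => decide (PySem.Chars.upperChar d = PySem.Chars.upperChar c)) rest from (List.takeWhile_append_dropWhile).symm, hbr]
          have hrec : pvGoA hp (List.dropWhile (fun d => decide (PySem.Chars.upperChar d = PySem.Chars.upperChar c)) rest) (PySem.Chars.upperChar c) (((0 + (List.takeWhile (fun d => decide (PySem.Chars.upperChar d = PySem.Chars.upperChar c)) rest).length : Nat)) : Int) = pvGoB hp (pvGroupByUpper (List.dropWhile (fun d => decide (PySem.Chars.upperChar d = PySem.Chars.upperChar c)) rest)) := by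
            apply ih
            · have h1 := List.length_dropWhile_le (fun d => decide (PySem.Chars.upperChar d = PySem.Chars.upperChar c)) rest
              have h2 : (c :: rest).length = rest.length + 1 := by simp
              omega
            · cases hr : List.dropWhile (fun d => decide (PySem.Chars.upperChar d = PySem.Chars.upperChar c)) rest with
              | nil => trivial
              | cons e es =>
                have hne : ¬ (PySem.Chars.upperChar e = PySem.Chars.upperChar c) := by
                  have := List.head?_dropWhile_not (fun d => decide (PySem.Chars.upperChar d = PySem.Chars.upperChar c)) rest
                  rw [hr] at this
                  simpa using this
                simp [pvEntry, hne]
          rw [hrec]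
          cases pvGoRun hp (List.takeWhile (fun d => decide (PySem.Chars.upperChar d = PySem.Chars.upperChar c)) rest) (0 + 1) with
          | none => simp
          | some out =>
            simp only
            cases pvGoB hp (pvGroupByUpper (List.dropWhile (fun d => decide (PySem.Chars.upperChar d = PySem.Chars.upperChar c)) rest)) <;> simp

-- ===== bridging the groupings to B's forward run-length encoding =====

theorem pvRunLengths_cons (c : Char) (rest : List Char) :
    pvRunLengths (c :: rest) =
      (1 + (rest.takeWhile (fun d => d = c)).length) ::
        pvRunLengths (rest.dropWhile (fun d => d = c)) := by
  rw [pvRunLengths]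

theorem pvGroupLens' : ∀ (n : Nat) (l : List Char), l.length ≤ n →
    (pvGroupByUpperAux n l).map List.length = pvRunLengths (l.map PySem.Chars.upperChar) := by
  intro n
  induction n with
  | zero =>
    intro l hl
    have : l = [] := List.length_eq_zero_iff.mp (Nat.le_zero.mp hl)
    subst this
    simp [pvGroupByUpperAux, pvRunLengths]
  | succ m ih =>
    intro l hl
    cases l with
    | nil => simp [pvGroupByUpperAux, pvRunLengths]
    | cons c rest =>
      simp only [pvGroupByUpperAux, List.map_cons, pvRunLengths_cons]
      rw [List.takeWhile_map, List.dropWhile_map]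
      simp only [Function.comp_def]
      congr 1
      · simp [Nat.add_comm]
      · rw [ih]
        have := List.length_dropWhile_le (fun d => decide (PySem.Chars.upperChar d = PySem.Chars.upperChar c)) rest
        simp only [List.length_cons] at hl
        omega

theorem pvGroupLens (l : List Char) :
    (pvGroupByUpper l).map List.length = pvRunLengths (l.map PySem.Chars.upperChar) :=
  pvGroupLens' l.length l le_rfl

-- run lengths of a reversed list: helper lemmas about takeWhile/dropWhile on appends
theorem pvTwAll {p : Char → Bool} {a s : List Char} (h : ∀ x ∈ a, p x = true) :
    (a ++ s).takeWhile p = a ++ s.takeWhile p := by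
  rw [List.takeWhile_append, if_pos]
  rw [List.takeWhile_eq_self_iff.mpr h]

theorem pvDwAll {p : Char → Bool} {a s : List Char} (h : ∀ x ∈ a, p x = true) :
    (a ++ s).dropWhile p = s.dropWhile p := by
  rw [List.dropWhile_append, if_pos]
  simp [List.dropWhile_eq_nil_iff.mpr h]

theorem pvTwNot {p : Char → Bool} {a s : List Char} (h : ¬ ∀ x ∈ a, p x = true) :
    (a ++ s).takeWhile p = a.takeWhile p := by
  rw [List.takeWhile_append, if_neg]
  intro hlen
  exact h (List.takeWhile_eq_self_iff.mp ((List.takeWhile_prefix p).eq_of_length hlen))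

theorem pvDwNot {p : Char → Bool} {a s : List Char} (h : ¬ ∀ x ∈ a, p x = true) :
    (a ++ s).dropWhile p = a.dropWhile p ++ s := by
  rw [List.dropWhile_append, if_neg]
  simp only [List.isEmpty_iff]
  intro hnil
  exact h (List.dropWhile_eq_nil_iff.mp hnil)

theorem pvGetLast?_suffix {d a : List Char} (h : d <:+ a) (hd : d ≠ []) :
    a.getLast? = d.getLast? := by
  obtain ⟨t, rfl⟩ := h
  rw [List.getLast?_append]
  cases h3 : d.getLast? with
  | none => exact absurd (List.getLast?_eq_none_iff.mp h3) hd
  | some z => rfl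

theorem pvRl_all_same {s : List Char} {c : Char} (hne : s ≠ []) (h : ∀ x ∈ s, x = c) :
    pvRunLengths s = [s.length] := by
  cases s with
  | nil => exact absurd rfl hne
  | cons c0 rest =>
    have hc0 : c0 = c := h c0 (by simp)
    subst hc0
    rw [pvRunLengths_cons]
    have hall : ∀ x ∈ rest, (fun d => decide (d = c0)) x = true := by
      intro x hx; simp [h x (List.mem_cons_of_mem _ hx)]
    rw [List.takeWhile_eq_self_iff.mpr hall, List.dropWhile_eq_nil_iff.mpr hall]
    simp [pvRunLengths, Nat.add_comm]

theorem pvRl_append : ∀ (n : Nat) (a s : List Char), a.length ≤ n → a ≠ [] → s ≠ [] →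
    (∀ x y, a.getLast? = some x → s.head? = some y → x ≠ y) →
    pvRunLengths (a ++ s) = pvRunLengths a ++ pvRunLengths s := by
  intro n
  induction n with
  | zero =>
    intro a s hl ha _ _
    exact absurd (List.length_eq_zero_iff.mp (Nat.le_zero.mp hl)) ha
  | succ m ih =>
    intro a s hl ha hs hbd
    cases a with
    | nil => exact absurd rfl ha
    | cons c a' =>
      cases s with
      | nil => exact absurd rfl hs
      | cons y s' =>
        by_cases hall : ∀ x ∈ a', (fun d => decide (d = c)) x = true
        · -- the whole of a is one run of key c; head of s breaks it
          have hyc : y ≠ c := by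
            have hx : (c :: a').getLast? = some c := by
              cases a' with
              | nil => rfl
              | cons b a'' =>
                have h1 : (c :: b :: a'').getLast? = (b :: a'').getLast? := by
                  rw [show (c :: b :: a'') = [c] ++ (b :: a'') from rfl, List.getLast?_append]
                  cases h2 : (b :: a'').getLast? with
                  | none => exact absurd (List.getLast?_eq_none_iff.mp h2) (by simp)
                  | some z => rfl
                rw [h1]
                cases h2 : (b :: a'').getLast? with
                | none => exact absurd (List.getLast?_eq_none_iff.mp h2) (by simp)
                | some z =>
                  have hz : z = c := by
                    have := List.mem_of_getLast? h2
                    simpa using hall z this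
                  rw [hz]
            exact fun h => (hbd c y hx rfl) h.symm
          have hrla : pvRunLengths (c :: a') = [1 + a'.length] := by
            rw [pvRunLengths_cons, List.takeWhile_eq_self_iff.mpr hall,
                List.dropWhile_eq_nil_iff.mpr hall]
            simp [pvRunLengths]
          rw [List.cons_append, pvRunLengths_cons]
          rw [pvTwAll hall, pvDwAll hall]
          rw [List.takeWhile_cons_of_neg (by simp [hyc]), List.dropWhile_cons_of_neg (by simp [hyc])]
          rw [hrla]
          simp
        · -- the first run of a ++ s stays inside a
          have hdnn : a'.dropWhile (fun d => decide (d = c)) ≠ [] := by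
            intro h0; exact hall (List.dropWhile_eq_nil_iff.mp h0)
          rw [List.cons_append, pvRunLengths_cons, pvTwNot hall, pvDwNot hall,
              pvRunLengths_cons]
          rw [ih (a'.dropWhile (fun d => decide (d = c))) (y :: s')
                (by have := List.length_dropWhile_le (fun d => decide (d = c)) a'
                    simp only [List.length_cons] at hl; omega)
                hdnn (by simp)
                (by intro x z hx hz
                    apply hbd x z _ hz
                    have ha'nn : a' ≠ [] := by
                      intro h0; subst h0; exact hall (by simp)
                    have h1 : (c :: a').getLast? = a'.getLast? :=
                      pvGetLast?_suffix (⟨[c], rfl⟩ : a' <:+ c :: a') ha'nn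
                    have h2 : a'.getLast? = (a'.dropWhile (fun d => decide (d = c))).getLast? :=
                      pvGetLast?_suffix (List.dropWhile_suffix _) hdnn
                    rw [h1, h2]; exact hx)]
          simp

theorem pvRl_reverse : ∀ (n : Nat) (u : List Char), u.length ≤ n →
    pvRunLengths u.reverse = (pvRunLengths u).reverse := by
  intro n
  induction n with
  | zero =>
    intro u hl
    have : u = [] := List.length_eq_zero_iff.mp (Nat.le_zero.mp hl)
    subst this; simp [pvRunLengths]
  | succ m ih =>
    intro u hl
    cases u with
    | nil => simp [pvRunLengths]
    | cons c rest =>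
      rw [pvRunLengths_cons]
      have hsplit : rest = rest.takeWhile (fun d => decide (d = c)) ++ rest.dropWhile (fun d => decide (d = c)) :=
        (List.takeWhile_append_dropWhile).symm
      have hrev : (c :: rest).reverse
          = (rest.dropWhile (fun d => decide (d = c))).reverse
            ++ ((rest.takeWhile (fun d => decide (d = c))).reverse ++ [c]) := by
        conv_lhs => rw [hsplit]
        simp only [List.reverse_cons, List.reverse_append, List.append_assoc]
      have hsall : ∀ x ∈ (rest.takeWhile (fun d => decide (d = c))).reverse ++ [c], x = c := by
        intro x hx
        rcases List.mem_append.mp hx with h | h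
        · have := List.mem_takeWhile_imp (List.mem_reverse.mp h)
          simpa using this
        · simpa using h
      have hsnn : (rest.takeWhile (fun d => decide (d = c))).reverse ++ [c] ≠ [] := by simp
      have hslen : ((rest.takeWhile (fun d => decide (d = c))).reverse ++ [c]).length
          = 1 + (rest.takeWhile (fun d => decide (d = c))).length := by
        simp [Nat.add_comm]
      cases hdrop : rest.dropWhile (fun d => decide (d = c)) with
      | nil =>
        rw [hrev, hdrop]
        simp only [List.reverse_nil, List.nil_append]
        rw [pvRl_all_same hsnn hsall, hslen]
        simp [pvRunLengths]
      | cons y t' =>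
        rw [hrev]
        rw [pvRl_append (m)
              ((rest.dropWhile (fun d => decide (d = c))).reverse)
              ((rest.takeWhile (fun d => decide (d = c))).reverse ++ [c])
              (by have := List.length_dropWhile_le (fun d => decide (d = c)) rest
                  simp only [List.length_reverse, List.length_cons] at *
                  omega)
              (by simp [hdrop]) hsnn
              (by intro x z hx hz
                  rw [List.getLast?_reverse, hdrop] at hx
                  have hxy : y = x := by simpa using hx
                  have hzc : z = c := hsall z (List.mem_of_head? hz)
                  rw [← hxy, hzc]
                  have hh := List.head?_dropWhile_not (fun d => decide (d = c)) rest
                  rw [hdrop] at hh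
                  simpa using hh)]
        rw [pvRl_all_same hsnn hsall, hslen]
        rw [ih (rest.dropWhile (fun d => decide (d = c)))
              (by have := List.length_dropWhile_le (fun d => decide (d = c)) rest
                  simp only [List.length_cons] at hl; omega)]
        rw [hdrop]
        simp

-- the inner scans agree: per-run emission equals a window of the table loop
theorem pvGoRun_eq_tbl (hp : List Char) : ∀ (r : List Char) (k : Nat),
    pvGoRun hp r k = pvTblAux hp k r.length := by
  intro r
  induction r with
  | nil => intro k; rfl
  | cons x rest ih =>
    intro k
    simp only [pvGoRun, List.length_cons, pvTblAux]
    cases PySem.List.pyGet? hp (k : Int) with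
    | none => rfl
    | some p =>
      simp only
      split
      · rfl
      · rw [ih (k + 1)]

theorem pvTbl_take (hp : List Char) : ∀ (j n k : Nat) (t : List Char), j ≤ n →
    pvTblAux hp k n = some t → pvTblAux hp k j = some (t.take j) := by
  intro j
  induction j with
  | zero => intro n k t _ _; rfl
  | succ j' ih =>
    intro n k t hj hsome
    cases n with
    | zero => omega
    | succ n' =>
      simp only [pvTblAux] at hsome ⊢
      cases hg : PySem.List.pyGet? hp (k : Int) with
      | none => rw [hg] at hsome; exact absurd hsome (by simp)
      | some p =>
        rw [hg] at hsome
        simp only at hsome ⊢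
        by_cases hpv : ((p.toNat : Int) - 33 < 0)
        · rw [if_pos hpv] at hsome; exact absurd hsome (by simp)
        · rw [if_neg hpv] at hsome ⊢
          cases hrec : pvTblAux hp (k + 1) n' with
          | none => rw [hrec] at hsome; exact absurd hsome (by simp)
          | some tl =>
            rw [hrec] at hsome
            simp only [Option.some.injEq] at hsome
            rw [ih n' (k + 1) tl (by omega) hrec]
            simp [← hsome]

theorem pvGoB_eq_join (hp : List Char) : ∀ (gs : List (List Char)),
    pvGoB hp gs = pvJoin hp (gs.map List.length) := by
  intro gs
  induction gs with
  | nil => rfl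
  | cons r rs ih =>
    simp only [pvGoB, List.map_cons, pvJoin, pvGoRun_eq_tbl hp r 0]
    cases pvTblAux hp 0 r.length with
    | none => rfl
    | some t =>
      simp only
      rw [ih]

theorem pvJoin_none (hp : List Char) {m : Nat} (hm : pvTblAux hp 0 m = none) :
    ∀ (Ls : List Nat), m ∈ Ls → pvJoin hp Ls = none := by
  intro Ls
  induction Ls with
  | nil => intro h; exact absurd h (by simp)
  | cons L Ls' ih =>
    intro hmem
    simp only [pvJoin]
    rcases List.mem_cons.mp hmem with h | h
    · subst h; rw [hm]
    · cases hL : pvTblAux hp 0 L with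
      | none => rfl
      | some t => simp only; rw [ih h]

theorem pvJoin_some (hp : List Char) {m : Nat} {table : List Char}
    (hm : pvTblAux hp 0 m = some table) :
    ∀ (Ls : List Nat), (∀ L ∈ Ls, L ≤ m) →
    pvJoin hp Ls = some ((Ls.map (fun L => table.take L)).flatten) := by
  intro Ls
  induction Ls with
  | nil => intro _; rfl
  | cons L Ls' ih =>
    intro hle
    simp only [pvJoin, List.map_cons, List.flatten_cons]
    rw [pvTbl_take hp L m 0 table (hle L (by simp)) hm]
    rw [ih (fun L' h => hle L' (List.mem_cons_of_mem _ h))]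

-- ===== VERDICT (by name: the statement is the Claim_ definition above) =====
theorem set_gap_open_penalty_spec : Claim_equal_set_gap_open_penalty := by
  intro seq hp _ hpre
  unfold Spec_set_gap_open_penalty set_gap_open_penalty set_gap_open_penalty_alt
  cases hrev : seq.toList.reverse with
  | nil =>
    have h0 : seq.toList = [] := by
      have := congrArg List.reverse hrev; simpa using this
    rw [h0]
    simp [pvRunLengths]
  | cons c0 t =>
    have hl : seq.toList = (c0 :: t).reverse := by
      rw [← hrev, List.reverse_reverse]
    rw [hl]
    dsimp only
    -- A's scan equals the join over the grouped reversed sequence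
    have hent : pvEntry hp.toList (c0 :: t) (PySem.Chars.upperChar c0) (-1) := by
      show (if PySem.Chars.upperChar c0 = PySem.Chars.upperChar c0 then (if (-1 : Int) < (hp.toList.length : Int) then -1 + 1 else -1) else 0) = 0
      rw [if_pos rfl, if_pos (by omega)]
      norm_num
    have hA := pvGoA_eq_pvGoB hp.toList (c0 :: t).length (c0 :: t) le_rfl
      (PySem.Chars.upperChar c0) (-1) hent
    rw [hA, pvGoB_eq_join]
    -- B's run lengths are the reverse of the group lengths
    have hruns : pvRunLengths (((c0 :: t).reverse).map PySem.Chars.upperChar)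
        = ((pvGroupByUpper (c0 :: t)).map List.length).reverse := by
      rw [List.map_reverse, pvRl_reverse ((c0 :: t).map PySem.Chars.upperChar).length _ le_rfl,
          pvGroupLens]
    simp only [hruns]
    -- the group-length list is nonempty, so max? is some m
    have hLs : (pvGroupByUpper (c0 :: t)).map List.length
        = (c0 :: t.takeWhile (fun d => PySem.Chars.upperChar d = PySem.Chars.upperChar c0)).length
          :: (pvGroupByUpper (t.dropWhile (fun d => PySem.Chars.upperChar d = PySem.Chars.upperChar c0))).map List.length := by
      rw [pvGroupByUpper_cons]; rfl
    cases hmax : ((pvGroupByUpper (c0 :: t)).map List.length).reverse.max? with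
    | none =>
      exfalso
      have := List.max?_eq_none_iff.mp hmax
      rw [hLs] at this
      simp at this
    | some mx =>
      have hmem : mx ∈ (pvGroupByUpper (c0 :: t)).map List.length := by
        have := List.max?_mem hmax
        exact List.mem_reverse.mp this
      have hub : ∀ L ∈ (pvGroupByUpper (c0 :: t)).map List.length, L ≤ mx := by
        intro L hL
        exact (List.max?_eq_some_iff.mp hmax).2 L (List.mem_reverse.mpr hL)
      cases htbl : pvTblAux hp.toList 0 mx with
      | none =>
        rw [pvJoin_none hp.toList htbl _ hmem]
        simp [htbl]
      | some table =>
        rw [pvJoin_some hp.toList htbl _ hub]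
        simp [htbl, List.reverse_reverse]
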